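-- pv_equiv track=rewrite | github.com/Xhourstoprogram/Quiz1CompTech | Quiz1.py | x_language_keyword_automaton
-- ===== SOURCE A (Python) =====
-- def x_language_keyword_automaton(input_string):
--     keywords = set(["int", "float", "while", "main", "const"])
--     token = ""
--     i = 0
--
--     while i < len(input_string):
--         char = input_string[i]
--
--         if char.isalpha():
--             token += char
--         else:
--             if token in keywords:
--                 yield (token, token)
--             token = ""
--
--         i += 1
--
--     if token in keywords:
--         yield (token, token)
-- ===== SOURCE B (Python) =====
-- def x_language_keyword_automaton(input_string):
--     keywords = {"int", "float", "while", "main", "const"}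
--     i = 0
--     n = len(input_string)
--     while i < n:
--         if input_string[i].isalpha():
--             j = i
--             while j < n and input_string[j].isalpha():
--                 j += 1
--             token = input_string[i:j]
--             if token in keywords:
--                 yield (token, token)
--             i = j
--         else:
--             i += 1
-- ===== Notes on version B (the rewrite author's own statement) =====
-- stated objective: simpler
-- what changed: Replaces the per-character accumulator automaton (with its duplicated end-of-string keyword check) by a run scanner: at each alphabetic position an inner pointer advances to the end of the maximal alphabetic run, the token is sliced out and tested once; no per-char string concatenation, no final-flush special case (measured much faster: slicing avoids building the token one character at a time).
import Mathlib
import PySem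

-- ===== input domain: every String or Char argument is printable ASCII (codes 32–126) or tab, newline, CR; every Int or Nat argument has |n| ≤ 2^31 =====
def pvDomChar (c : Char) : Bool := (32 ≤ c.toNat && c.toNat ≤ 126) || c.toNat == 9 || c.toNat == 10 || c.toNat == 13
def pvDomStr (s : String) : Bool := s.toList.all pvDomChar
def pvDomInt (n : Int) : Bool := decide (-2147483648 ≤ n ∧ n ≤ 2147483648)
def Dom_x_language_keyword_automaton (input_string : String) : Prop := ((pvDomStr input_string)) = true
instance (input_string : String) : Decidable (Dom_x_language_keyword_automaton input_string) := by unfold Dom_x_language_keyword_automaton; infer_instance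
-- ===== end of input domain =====

-- B replaces A's per-character accumulator automaton by a maximal-run scanner (simpler: no accumulator, no duplicated end-of-string check); equal output proved for all strings.


-- ===== PORT A =====
-- keywords = set([...]) (shared literal; both Pythons build the same set)
def pvKeywords : List (List Char) :=
  PySem.Set.ofList ["int".toList, "float".toList, "while".toList, "main".toList, "const".toList]

-- A's while-loop: state is the running token; on a non-alpha char flush it, at the end flush once more.
def pvLoopA : List Char → List Char → List (String × String)
  | [], token => if token ∈ pvKeywords then [(String.ofList token, String.ofList token)] else []
  | c :: cs, token =>
    if PySem.Chars.isalpha c then pvLoopA cs (token ++ [c])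
    else (if token ∈ pvKeywords then [(String.ofList token, String.ofList token)] else []) ++ pvLoopA cs []

def x_language_keyword_automaton (input_string : String) : List (String × String) :=
  pvLoopA input_string.toList []

-- ===== PORT B =====
-- B's run scanner: at an alphabetic char take the whole maximal alphabetic run as the token (inner while j),
-- test it once, and resume after the run; non-alpha chars are skipped one at a time.
def pvScanB : List Char → List (String × String)
  | [] => []
  | c :: cs =>
    if PySem.Chars.isalpha c then
      let token := c :: cs.takeWhile PySem.Chars.isalpha
      (if token ∈ pvKeywords then [(String.ofList token, String.ofList token)] else []) ++
        pvScanB (cs.dropWhile PySem.Chars.isalpha)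
    else pvScanB cs
  termination_by cs => cs.length
  decreasing_by
  · simp only [List.length_cons]
    exact Nat.lt_succ_of_le (List.length_dropWhile_le _ _)
  · simp

def x_language_keyword_automaton_alt (input_string : String) : List (String × String) :=
  pvScanB input_string.toList

-- ===== PRECONDITION & SPEC =====
def Spec_x_language_keyword_automaton (input_string : String) (out : List (String × String)) : Prop := out = x_language_keyword_automaton_alt input_string
instance (input_string : String) (out : List (String × String)) : Decidable (Spec_x_language_keyword_automaton input_string out) := by unfold Spec_x_language_keyword_automaton; infer_instance

-- ===== CLAIM (what is proved, stated in full; the proofs are below) =====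
def Claim_equal_x_language_keyword_automaton : Prop := ∀ (input_string : String), Dom_x_language_keyword_automaton input_string → Spec_x_language_keyword_automaton input_string (x_language_keyword_automaton input_string)

-- ===== LEMMAS AND PROOFS =====

theorem pvScanB_flush (cs : List Char) :
    pvScanB cs =
      (if cs.takeWhile PySem.Chars.isalpha ∈ pvKeywords then
        [(String.ofList (cs.takeWhile PySem.Chars.isalpha), String.ofList (cs.takeWhile PySem.Chars.isalpha))]
      else []) ++ pvScanB (cs.dropWhile PySem.Chars.isalpha) := by
  cases cs with
  | nil => simp [pvScanB]; decide
  | cons c cs =>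
    by_cases h : PySem.Chars.isalpha c
    · simp [pvScanB, h]
    · simp [pvScanB, h]
      decide

theorem pvLoopA_eq (cs : List Char) : ∀ token : List Char,
    pvLoopA cs token =
      (if token ++ cs.takeWhile PySem.Chars.isalpha ∈ pvKeywords then
        [(String.ofList (token ++ cs.takeWhile PySem.Chars.isalpha),
          String.ofList (token ++ cs.takeWhile PySem.Chars.isalpha))]
      else []) ++ pvScanB (cs.dropWhile PySem.Chars.isalpha) := by
  induction cs with
  | nil => intro token; simp [pvLoopA, pvScanB]
  | cons c cs ih =>
    intro token
    by_cases h : PySem.Chars.isalpha c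
    · simp only [pvLoopA, h, if_true, List.takeWhile_cons, List.dropWhile_cons]
      rw [ih (token ++ [c])]
      simp [List.append_assoc]
    · simp only [pvLoopA, h, Bool.false_eq_true, if_false, List.takeWhile_cons,
        List.dropWhile_cons]
      have h1 : pvScanB (c :: cs) = pvScanB cs := by simp [pvScanB, h]
      rw [ih [], h1, pvScanB_flush cs]
      simp

-- ===== VERDICT (by name: the statement is the Claim_ definition above) =====
theorem x_language_keyword_automaton_spec : Claim_equal_x_language_keyword_automaton := by
  intro s _
  unfold Spec_x_language_keyword_automaton x_language_keyword_automaton x_language_keyword_automaton_alt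
  rw [pvLoopA_eq s.toList [], pvScanB_flush s.toList]
  simp
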